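-- pv_equiv track=rewrite | github.com/heyns1000/omnigrid | scripts/merge_gatekeeper.py | validate_ci_checks
-- ===== SOURCE A (Python) =====
-- from typing import Dict, List, Tuple, Optional
--
-- def validate_ci_checks(checks: List[Dict]) -> Tuple[bool, List[str]]:
--     """Validate all 14 CI checks pass"""
--     required_check_names = [
--         'mr-actuary-gpr',
--         'celestial-payroll-tps',
--         'durable-objects-latency',
--         'keccak256-hash-rate',
--         '9s-pulse-simulation',
--         'unit-tests',
--         'integration-tests',
--         'security-scanning',
--         'visual-regression',
--         'performance-benchmarks',
--         'linting',
--         'type-checking',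
--         'dependency-audit',
--         'license-compliance'
--     ]
--
--     passed_checks = []
--     failed_checks = []
--
--     for check_name in required_check_names:
--         check = next((c for c in checks if check_name in c.get('name', '')), None)
--         if check and check.get('status') == 'completed' and check.get('conclusion') == 'success':
--             passed_checks.append(check_name)
--         else:
--             failed_checks.append(check_name)
--
--     all_passed = len(failed_checks) == 0
--     return all_passed, failed_checks
-- ===== SOURCE B (Python) =====
-- from typing import Dict, List, Tuple
--
-- def validate_ci_checks(checks: List[Dict]) -> Tuple[bool, List[str]]:
--     """Validate all 14 CI checks pass (single pass over checks with a dict index)."""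
--     required_check_names = [
--         'mr-actuary-gpr',
--         'celestial-payroll-tps',
--         'durable-objects-latency',
--         'keccak256-hash-rate',
--         '9s-pulse-simulation',
--         'unit-tests',
--         'integration-tests',
--         'security-scanning',
--         'visual-regression',
--         'performance-benchmarks',
--         'linting',
--         'type-checking',
--         'dependency-audit',
--         'license-compliance'
--     ]
--
--     found = {}
--     for check in checks:
--         name = check.get('name', '')
--         for req in required_check_names:
--             if req not in found and req in name:
--                 found[req] = check
--
--     failed_checks = [
--         req for req in required_check_names
--         if req not in found
--         or found[req].get('status') != 'completed'
--         or found[req].get('conclusion') != 'success'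
--     ]
--     return len(failed_checks) == 0, failed_checks
-- ===== Notes on version B (the rewrite author's own statement) =====
-- stated objective: alternative
-- what changed: B makes a single pass over the checks building a dict from required name to its first matching check (a not-yet-assigned guard preserves first-match order), then builds failed_checks by a comprehension over the required names; A instead scans the whole checks list from scratch for each required name and threads a passed/failed accumulator pair.
import Mathlib
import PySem

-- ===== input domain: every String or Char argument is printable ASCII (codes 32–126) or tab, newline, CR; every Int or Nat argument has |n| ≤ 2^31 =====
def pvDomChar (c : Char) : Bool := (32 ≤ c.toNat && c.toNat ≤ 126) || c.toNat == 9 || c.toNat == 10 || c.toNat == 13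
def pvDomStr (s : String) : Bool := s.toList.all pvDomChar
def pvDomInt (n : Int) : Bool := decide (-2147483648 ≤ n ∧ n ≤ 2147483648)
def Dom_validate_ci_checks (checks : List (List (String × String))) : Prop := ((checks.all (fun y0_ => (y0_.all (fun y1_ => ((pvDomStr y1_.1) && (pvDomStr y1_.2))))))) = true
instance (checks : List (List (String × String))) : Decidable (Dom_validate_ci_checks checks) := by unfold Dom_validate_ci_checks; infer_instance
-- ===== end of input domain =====

-- B makes one pass over `checks` building a dict of first matches, instead of A's per-required-name rescans; alternative decomposition, return value only.

def requiredCheckNames : List String :=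
  ["mr-actuary-gpr", "celestial-payroll-tps", "durable-objects-latency",
   "keccak256-hash-rate", "9s-pulse-simulation", "unit-tests", "integration-tests",
   "security-scanning", "visual-regression", "performance-benchmarks", "linting",
   "type-checking", "dependency-audit", "license-compliance"]

-- ===== PORT A =====
-- for each required name: next(...) over checks, then the `check and status and conclusion` test
def validate_ci_checks (checks : List (List (String × String))) : Bool × List String :=
  let pf :=
    requiredCheckNames.foldl
      (fun (pf : List String × List String) check_name =>
        match checks.find? (fun c => PySem.Str.isIn check_name ((PySem.Dict.mk c).getD "name" "")) with
        | some check =>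
            if !check.isEmpty
               && ((PySem.Dict.mk check).get? "status" == some "completed")
               && ((PySem.Dict.mk check).get? "conclusion" == some "success") then
              (pf.1 ++ [check_name], pf.2)
            else
              (pf.1, pf.2 ++ [check_name])
        | none => (pf.1, pf.2 ++ [check_name]))
      ([], [])
  (pf.2.length == 0, pf.2)

-- ===== PORT B =====
-- one pass over checks: found[req] = first check whose name contains req; then a comprehension over required names
def validate_ci_checks_alt (checks : List (List (String × String))) : Bool × List String :=
  let found : PySem.Dict String (List (String × String)) :=
    checks.foldl
      (fun found check =>
        let name := (PySem.Dict.mk check).getD "name" ""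
        requiredCheckNames.foldl
          (fun fd req =>
            if !fd.contains req && PySem.Str.isIn req name then fd.insert req check else fd)
          found)
      PySem.Dict.empty
  let failed_checks :=
    requiredCheckNames.filter
      (fun req =>
        match found.get? req with
        | none => true
        | some c =>
            !((PySem.Dict.mk c).get? "status" == some "completed")
            || !((PySem.Dict.mk c).get? "conclusion" == some "success"))
  (failed_checks.length == 0, failed_checks)

-- ===== PRECONDITION & SPEC =====
def Spec_validate_ci_checks (checks : List (List (String × String))) (out : Bool × List String) : Prop := out = validate_ci_checks_alt checks
instance (checks : List (List (String × String))) (out : Bool × List String) : Decidable (Spec_validate_ci_checks checks out) := by unfold Spec_validate_ci_checks; infer_instance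

-- ===== CLAIM (what is proved, stated in full; the proofs are below) =====
def Claim_equal_validate_ci_checks : Prop := ∀ (checks : List (List (String × String))), Dom_validate_ci_checks checks → Spec_validate_ci_checks checks (validate_ci_checks checks)

-- ===== LEMMAS AND PROOFS =====

-- the predicate A's next(...) uses
def pvPred (req : String) (c : List (String × String)) : Bool :=
  PySem.Str.isIn req ((PySem.Dict.mk c).getD "name" "")

-- inner loop of B: processing one check assigns found[req] exactly when req is unassigned and matched
theorem pvInner (L : List String) (fd : PySem.Dict String (List (String × String)))
    (name : String) (check : List (String × String)) (req : String) :
    ((L.foldl (fun fd r =>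
        if !fd.contains r && PySem.Str.isIn r name then fd.insert r check else fd) fd).get? req)
    = match fd.get? req with
      | some v => some v
      | none => if req ∈ L ∧ PySem.Str.isIn req name then some check else none := by
  induction L generalizing fd with
  | nil => cases h : fd.get? req <;> simp [h]
  | cons r L ih =>
    simp only [List.foldl_cons]
    by_cases hr : r = req
    · subst hr
      cases h : fd.get? r with
      | some v =>
        have hc : fd.contains r = true := by
          rw [PySem.Dict.contains_eq_isSome_get?, h]; rfl
        have hstep : (if !fd.contains r && PySem.Str.isIn r name then fd.insert r check else fd) = fd := by
          simp [hc]
        rw [hstep, ih fd, h]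
      | none =>
        have hc : fd.contains r = false := by
          rw [PySem.Dict.contains_eq_isSome_get?, h]; rfl
        by_cases hin : PySem.Str.isIn r name = true
        · have hcond : (!fd.contains r && PySem.Str.isIn r name) = true := by
            rw [hc, hin]; rfl
          rw [if_pos hcond, ih (fd.insert r check), PySem.Dict.get?_insert_self]
          have hinC : PySem.Chars.isIn r.toList name.toList = true := by simpa using hin
          simp [hinC]
        · have hin' : PySem.Str.isIn r name = false := Bool.eq_false_iff.mpr hin
          have hcond : (!fd.contains r && PySem.Str.isIn r name) = false := by
            rw [hin', Bool.and_false]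
          rw [hcond]
          simp only [Bool.false_eq_true, if_false]
          rw [ih fd, h]
          have hinC : PySem.Chars.isIn r.toList name.toList = false := by simpa using hin'
          simp [hinC]
    · have hstep : ((if !fd.contains r && PySem.Str.isIn r name then fd.insert r check else fd).get? req)
          = fd.get? req := by
        split
        · have hne : req ≠ r := fun h => hr h.symm
          exact PySem.Dict.get?_insert_of_ne _ _ hne
        · rfl
      rw [ih, hstep]
      cases h : fd.get? req with
      | some v => rfl
      | none =>
        have hne : req ≠ r := fun h => hr h.symm
        have hmem : (req ∈ r :: L) ↔ (req ∈ L) := by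
          simp [List.mem_cons, hne]
        simp [hmem]

-- outer loop of B: found[req] is the first check matching req
theorem pvOuter (checks : List (List (String × String)))
    (fd : PySem.Dict String (List (String × String))) (req : String)
    (hreq : req ∈ requiredCheckNames) :
    ((checks.foldl
        (fun found check =>
          let name := (PySem.Dict.mk check).getD "name" ""
          requiredCheckNames.foldl
            (fun fd r =>
              if !fd.contains r && PySem.Str.isIn r name then fd.insert r check else fd)
            found)
        fd).get? req)
    = match fd.get? req with
      | some v => some v
      | none => checks.find? (pvPred req) := by
  induction checks generalizing fd with
  | nil => cases h : fd.get? req <;> simp [h]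
  | cons c cs ih =>
    simp only [List.foldl_cons]
    rw [ih, pvInner]
    cases h : fd.get? req with
    | some v => rfl
    | none =>
      simp only [List.find?]
      cases hinC : PySem.Chars.isIn req.toList (((PySem.Dict.mk c).getD "name" "").toList) with
      | true => simp [hreq, pvPred, hinC]
      | false => simp [hreq, pvPred, hinC]

-- the 14 required names are nonempty strings
theorem pvReqNonempty : ∀ r ∈ requiredCheckNames, r ≠ "" := by decide

-- a matched check is a nonempty dict (its 'name' value contains a nonempty substring)
theorem pvMatched_nonempty (req : String) (hreq : req ≠ "") (c : List (String × String))
    (h : pvPred req c = true) : c.isEmpty = false := by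
  cases c with
  | nil =>
    exfalso
    have h' : PySem.Chars.isIn req.toList ([] : List Char) = true := by
      simpa [pvPred] using h
    have hinf := (PySem.Chars.isIn_iff_infix _ _).mp h'
    simp at hinf
    apply hreq
    have h0 : req.toList = "".toList := by simpa using hinf
    exact String.toList_inj.mp h0
  | cons x xs => rfl

-- the failure test applied to required name req, stated via find?
def pvFail (checks : List (List (String × String))) (req : String) : Bool :=
  match checks.find? (pvPred req) with
  | none => true
  | some c =>
      !((PySem.Dict.mk c).get? "status" == some "completed")
      || !((PySem.Dict.mk c).get? "conclusion" == some "success")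

-- A's pair fold: the failed component is the filter of the required names
theorem pvAfold (checks : List (List (String × String))) (L : List String)
    (hL : ∀ r ∈ L, r ≠ "") (p f : List String) :
    (L.foldl
      (fun (pf : List String × List String) check_name =>
        match checks.find? (fun c => PySem.Str.isIn check_name ((PySem.Dict.mk c).getD "name" "")) with
        | some check =>
            if !check.isEmpty
               && ((PySem.Dict.mk check).get? "status" == some "completed")
               && ((PySem.Dict.mk check).get? "conclusion" == some "success") then
              (pf.1 ++ [check_name], pf.2)
            else
              (pf.1, pf.2 ++ [check_name])
        | none => (pf.1, pf.2 ++ [check_name])) (p, f)).2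
    = f ++ L.filter (pvFail checks) := by
  induction L generalizing p f with
  | nil => simp
  | cons r L ih =>
    have hr : r ≠ "" := hL r (List.mem_cons_self ..)
    have hL' : ∀ r' ∈ L, r' ≠ "" := fun r' h => hL r' (List.mem_cons_of_mem _ h)
    simp only [List.foldl_cons, List.filter_cons]
    cases hfind : checks.find? (fun c => PySem.Str.isIn r ((PySem.Dict.mk c).getD "name" "")) with
    | none =>
      have hfail : pvFail checks r = true := by
        rw [pvFail]; have hfp : checks.find? (pvPred r) = none := hfind
        rw [hfp]
      rw [hfind] at *
      simp only [hfail, if_pos rfl]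
      rw [ih hL' _ _]
      simp
    | some c =>
      have hpred : pvPred r c = true := List.find?_some hfind
      have hne : c.isEmpty = false := pvMatched_nonempty r hr c hpred
      have hfindP : checks.find? (pvPred r) = some c := hfind
      cases hs : ((PySem.Dict.mk c).get? "status" == some "completed") with
      | false =>
        have hfail : pvFail checks r = true := by rw [pvFail, hfindP]; simp [hs]
        simp only [hfind, hne, hs, Bool.not_false, Bool.true_and, Bool.false_and,
          Bool.and_false, Bool.false_eq_true, if_false, hfail, if_pos rfl]
        rw [ih hL' _ _]
        simp
      | true =>
        cases hk : ((PySem.Dict.mk c).get? "conclusion" == some "success") with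
        | false =>
          have hfail : pvFail checks r = true := by rw [pvFail, hfindP]; simp [hk]
          simp only [hfind, hne, hs, hk, Bool.not_false, Bool.true_and, Bool.and_false,
            Bool.and_true, Bool.false_eq_true, if_false, hfail, if_pos rfl]
          rw [ih hL' _ _]
          simp
        | true =>
          have hfail : pvFail checks r = false := by rw [pvFail, hfindP]; simp [hs, hk]
          simp only [hfind, hne, hs, hk, Bool.not_false, Bool.true_and, Bool.and_true,
            if_pos rfl, hfail, Bool.false_eq_true, if_false]
          rw [ih hL' _ _]
          simp

-- ===== VERDICT (by name: the statement is the Claim_ definition above) =====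
theorem validate_ci_checks_spec : Claim_equal_validate_ci_checks := by
  intro checks _
  unfold Spec_validate_ci_checks validate_ci_checks validate_ci_checks_alt
  have hfilter :
      requiredCheckNames.filter
        (fun req =>
          match (checks.foldl
            (fun found check =>
              let name := (PySem.Dict.mk check).getD "name" ""
              requiredCheckNames.foldl
                (fun fd r =>
                  if !fd.contains r && PySem.Str.isIn r name then fd.insert r check else fd)
                found)
            PySem.Dict.empty).get? req with
          | none => true
          | some c =>
              !((PySem.Dict.mk c).get? "status" == some "completed")
              || !((PySem.Dict.mk c).get? "conclusion" == some "success"))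
      = requiredCheckNames.filter (pvFail checks) := by
    apply List.filter_congr
    intro req hreq
    have hfound := pvOuter checks PySem.Dict.empty req hreq
    rw [PySem.Dict.get?_empty] at hfound
    simp only [hfound, pvFail]
  have hA := pvAfold checks requiredCheckNames pvReqNonempty [] []
  simp only [hA, List.nil_append, hfilter]
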